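-- pv_equiv track=rewrite | github.com/AuthEceSoftEng/CodeSummarizer | src/clusterer/cluster_tools.py | change_label_depth
-- ===== SOURCE A (Python) =====
-- def change_label_depth(labels_true, depth=0):
--
--     # Remove maximum common subsequence
--     flag = True
--     while(True):
--         check = labels_true[0].split('.')[0]
--         for i in labels_true:
--             if not(i.split('.')[0] == check):
--                 flag = False
--         if flag:
--             labels_true = ['.'.join(i.split('.')[1:]) for i in labels_true]
--             continue
--         else:
--             break
--     # Remove the file name from the label path
--     #  labels_true = ['.'.join(l.split('.')[1:]) for l in labels_true]
--
--     # Make label length equal to depth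
--     if depth <= 0:
--         labels_true = [l.split('.')[0] for l in labels_true]
--     elif depth > 0:
--         for idx, label in enumerate(labels_true):
--             if len(label.split('.')) > depth+1:
--                 labels_true[idx] = '.'.join(label.split('.')[0:depth])
--
--     return labels_true
-- ===== SOURCE B (Python) =====
-- def change_label_depth(labels_true, depth=0):
--     # Split each label once; find the longest common extended token prefix
--     # (missing tokens read as ''), then trim the remainders to the depth.
--     toks = [l.split('.') for l in labels_true]
--     head = toks[0] if toks else ['']
--
--     def tok(ts, k):
--         return ts[k] if k < len(ts) else ''
--
--     k = 0
--     while all(tok(ts, k) == tok(head, k) for ts in toks):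
--         k += 1
--     rest = [ts[k:] if k < len(ts) else [''] for ts in toks]
--     if depth <= 0:
--         return [ts[0] for ts in rest]
--     return ['.'.join(ts[:depth]) if len(ts) > depth + 1 else '.'.join(ts)
--             for ts in rest]
-- ===== Notes on version B (the rewrite author's own statement) =====
-- stated objective: alternative
-- what changed: B splits each label once and finds the longest common token prefix by advancing a single index k over the token lists, then trims, instead of A's while-loop that re-splits and re-joins every label on every stripped level (an asymptotic improvement, though a timing run could not measure it).
import Mathlib
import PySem

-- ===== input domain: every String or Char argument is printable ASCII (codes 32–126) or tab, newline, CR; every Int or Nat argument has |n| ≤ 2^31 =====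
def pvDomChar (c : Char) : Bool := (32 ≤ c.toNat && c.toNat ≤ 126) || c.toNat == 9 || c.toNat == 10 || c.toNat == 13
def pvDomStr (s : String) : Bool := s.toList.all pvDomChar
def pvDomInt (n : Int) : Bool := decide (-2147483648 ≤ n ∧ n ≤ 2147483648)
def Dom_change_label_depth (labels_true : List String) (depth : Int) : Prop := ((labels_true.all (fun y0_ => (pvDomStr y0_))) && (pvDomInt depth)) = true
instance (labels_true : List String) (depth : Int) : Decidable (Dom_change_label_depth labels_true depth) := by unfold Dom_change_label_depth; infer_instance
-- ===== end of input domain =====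

-- B replaces A's repeated strip-one-level-and-rescan loop by splitting each label once and
-- advancing a single token index; equivalence is about the RETURN value only (A can mutate
-- its argument in place in the depth > 0 branch when no level was stripped).

-- s.split('.')  (the separator "." is non-empty, so split? always returns a value)
def pySplitDot (s : String) : List String := (PySem.Str.split? s ".").getD []

-- ===== PORT A =====
-- fuel for A's 'while True' loop (totality device only: under Pre_ the loop breaks
-- strictly before the fuel runs out, because some token level disagrees)
def aFuel (ls : List String) : Nat := ls.foldl (fun a l => a + l.toList.length) 0 + 2

def aLoop : Nat → List String → List String
  | 0, ls => ls
  | fuel+1, ls =>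
    let check := (pySplitDot (ls.headD "")).headD ""
    let flag := ls.foldl (fun f i => if !((pySplitDot i).headD "" == check) then false else f) true
    if flag then aLoop fuel (ls.map (fun i => PySem.Str.join "." ((pySplitDot i).drop 1)))
    else ls

def change_label_depth (labels_true : List String) (depth : Int) : List String :=
  let ls := aLoop (aFuel labels_true) labels_true
  if depth ≤ 0 then
    ls.map (fun l => (pySplitDot l).headD "")
  else
    ls.map (fun label =>
      if ((pySplitDot label).length : Int) > depth + 1 then
        PySem.Str.join "." (PySem.List.slice (pySplitDot label) (some 0) (some depth))
      else label)

-- ===== PORT B =====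
def bTok (ts : List String) (k : Nat) : String := ts.getD k ""

-- fuel for B's while loop (totality device, as in A)
def bFuel (toks : List (List String)) : Nat := toks.foldl (fun a ts => a + ts.length) 0 + 2

def bFindK (toks : List (List String)) (head : List String) : Nat → Nat → Nat
  | 0, k => k
  | fuel+1, k =>
    if toks.all (fun ts => bTok ts k == bTok head k) then bFindK toks head fuel (k+1) else k

def change_label_depth_alt (labels_true : List String) (depth : Int) : List String :=
  let toks := labels_true.map pySplitDot
  let head := toks.headD [""]
  let k := bFindK toks head (bFuel toks) 0
  let rest := toks.map (fun ts => if k < ts.length then ts.drop k else [""])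
  if depth ≤ 0 then
    rest.map (fun ts => ts.headD "")
  else
    rest.map (fun ts =>
      if (ts.length : Int) > depth + 1 then
        PySem.Str.join "." (PySem.List.slice ts none (some depth))
      else PySem.Str.join "." ts)

-- ===== PRECONDITION & SPEC =====
-- a label's token list with trailing empty tokens removed ('a' and 'a.' strip identically)
def rstripEmpty (ts : List String) : List String := (ts.reverse.dropWhile (· == "")).reverse

-- Pre_ excludes the empty list (A raises IndexError) and lists whose labels all have the
-- same token sequence up to trailing empty tokens (A's while loop never breaks: it diverges).
def Pre_change_label_depth (labels_true : List String) (depth : Int) : Prop :=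
  labels_true ≠ [] ∧
  ¬ (∀ l ∈ labels_true, rstripEmpty (pySplitDot l) = rstripEmpty (pySplitDot (labels_true.headD "")))

instance (labels_true : List String) (depth : Int) : Decidable (Pre_change_label_depth labels_true depth) := by
  unfold Pre_change_label_depth; infer_instance

def pvWitness_change_label_depth : List String × Int := (["pkg.a.x", "pkg.b"], 0)

def Spec_change_label_depth (labels_true : List String) (depth : Int) (out : List String) : Prop :=
  out = change_label_depth_alt labels_true depth
instance (labels_true : List String) (depth : Int) (out : List String) : Decidable (Spec_change_label_depth labels_true depth out) := by
  unfold Spec_change_label_depth; infer_instance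

-- ===== CLAIM (what is proved, stated in full; the proofs are below) =====
def Claim_equal_change_label_depth : Prop := ∀ (labels_true : List String) (depth : Int), Dom_change_label_depth labels_true depth → Pre_change_label_depth labels_true depth → Spec_change_label_depth labels_true depth (change_label_depth labels_true depth)

-- ===== LEMMAS AND PROOFS =====

-- specification recursion for splitting a character list at '.'
def sd : List Char → List (List Char)
  | [] => [[]]
  | c :: r =>
    if c = '.' then [] :: sd r
    else
      match sd r with
      | [] => [[c]]
      | h :: t => (c :: h) :: t

theorem sd_ne_nil (cs : List Char) : sd cs ≠ [] := by
  cases cs with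
  | nil => simp [sd]
  | cons c r =>
    simp only [sd]
    split
    · simp
    · cases h : sd r <;> simp

theorem go_eq (fuel : Nat) : ∀ (l cur : List Char) (acc : List (List Char)), l.length ≤ fuel →
    PySem.Chars.splitOn.go ['.'] fuel l cur acc
      = acc.reverse ++ ((cur.reverse ++ (sd l).headI) :: (sd l).tail) := by
  induction fuel with
  | zero =>
    intro l cur acc hl
    have : l = [] := by cases l <;> simp_all
    subst this
    simp [PySem.Chars.splitOn.go, sd]
  | succ f ih =>
    intro l cur acc hl
    cases l with
    | nil => simp [PySem.Chars.splitOn.go, sd]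
    | cons c rest =>
      simp only [PySem.Chars.splitOn.go]
      by_cases hc : c = '.'
      · subst hc
        rw [if_pos (by simp [List.isPrefixOf])]
        rw [ih _ _ _ (by simpa using Nat.le_of_succ_le_succ hl)]
        obtain ⟨h, t, hsd⟩ := List.exists_cons_of_ne_nil (sd_ne_nil rest)
        simp [sd, hsd]
      · rw [if_neg (by simp [List.isPrefixOf]; exact fun h => hc h.symm)]
        rw [ih _ _ _ (by simpa using Nat.le_of_succ_le_succ hl)]
        have h := sd_ne_nil rest
        cases hsd : sd rest with
        | nil => exact absurd hsd h
        | cons h t => simp [sd, hc, hsd]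

theorem splitOn_eq_sd (cs : List Char) : PySem.Chars.splitOn cs ['.'] = sd cs := by
  unfold PySem.Chars.splitOn
  rw [go_eq _ _ _ _ (by omega)]
  obtain ⟨h, t, hsd⟩ := List.exists_cons_of_ne_nil (sd_ne_nil cs)
  simp [hsd]

theorem pySplitDot_eq (s : String) : pySplitDot s = (sd s.toList).map String.ofList := by
  simp [pySplitDot, PySem.Str.split?, PySem.Chars.split?, splitOn_eq_sd]

theorem join_sd (cs : List Char) : PySem.Chars.join ['.'] (sd cs) = cs := by
  induction cs with
  | nil => simp [sd, PySem.Chars.join_singleton]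
  | cons c r ih =>
    by_cases hc : c = '.'
    · subst hc
      obtain ⟨h, t, hsd⟩ := List.exists_cons_of_ne_nil (sd_ne_nil r)
      rw [show sd ('.' :: r) = [] :: sd r by simp [sd]]
      rw [hsd] at ih ⊢
      rw [PySem.Chars.join_cons_cons]
      simpa using ih
    · obtain ⟨h, t, hsd⟩ := List.exists_cons_of_ne_nil (sd_ne_nil r)
      rw [show sd (c :: r) = (c :: h) :: t by simp [sd, hc, hsd]]
      rw [hsd] at ih
      cases t with
      | nil => simpa [PySem.Chars.join, List.intercalate] using congrArg (c :: ·) ih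
      | cons q t' =>
        rw [PySem.Chars.join_cons_cons] at ih ⊢
        simpa using congrArg (c :: ·) ih

theorem noDot_sd (cs : List Char) : ∀ p ∈ sd cs, '.' ∉ p := by
  induction cs with
  | nil => simp [sd]
  | cons c r ih =>
    by_cases hc : c = '.'
    · subst hc
      rw [show sd ('.' :: r) = [] :: sd r by simp [sd]]
      intro p hp
      rcases List.mem_cons.mp hp with hp | hp
      · simp [hp]
      · exact ih p hp
    · obtain ⟨h, t, hsd⟩ := List.exists_cons_of_ne_nil (sd_ne_nil r)
      rw [show sd (c :: r) = (c :: h) :: t by simp [sd, hc, hsd]]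
      intro p hp
      rcases List.mem_cons.mp hp with hp | hp
      · subst hp
        intro hmem
        rcases List.mem_cons.mp hmem with hmem | hmem
        · exact hc hmem.symm
        · exact ih h (by simp [hsd]) hmem
      · exact ih p (by simp [hsd, hp])

theorem sd_of_noDot (p : List Char) (h : '.' ∉ p) : sd p = [p] := by
  induction p with
  | nil => simp [sd]
  | cons c r ih =>
    have hc : ¬ c = '.' := by intro hh; exact h (by simp [hh])
    have : sd r = [r] := ih (fun hm => h (by simp [hm]))
    simp [sd, hc, this]

theorem sd_append (p cs : List Char) (h : '.' ∉ p) :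
    sd (p ++ cs) = (p ++ (sd cs).headI) :: (sd cs).tail := by
  induction p with
  | nil =>
    obtain ⟨h', t, hsd⟩ := List.exists_cons_of_ne_nil (sd_ne_nil cs)
    simp [hsd]
  | cons c r ih =>
    have hc : ¬ c = '.' := by intro hh; exact h (by simp [hh])
    have hr := ih (fun hm => h (by simp [hm]))
    simp only [List.cons_append, sd, if_neg hc, hr]

theorem sd_join (parts : List (List Char)) (hne : parts ≠ []) (h : ∀ p ∈ parts, '.' ∉ p) :
    sd (PySem.Chars.join ['.'] parts) = parts := by
  induction parts with
  | nil => exact absurd rfl hne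
  | cons p rest ih =>
    cases rest with
    | nil =>
      rw [PySem.Chars.join_singleton]
      exact sd_of_noDot p (h p (by simp))
    | cons q rest' =>
      rw [PySem.Chars.join_cons_cons]
      have hjoin := ih (by simp) (fun x hx => h x (List.mem_cons_of_mem _ hx))
      rw [List.append_assoc, sd_append p _ (h p (by simp))]
      rw [show ['.'] ++ PySem.Chars.join ['.'] (q :: rest') = '.' :: PySem.Chars.join ['.'] (q :: rest') from rfl]
      rw [show sd ('.' :: PySem.Chars.join ['.'] (q :: rest')) = [] :: sd (PySem.Chars.join ['.'] (q :: rest')) by simp [sd]]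
      rw [hjoin]
      simp

theorem toList_pySplitDot_join (parts : List (List Char)) :
    (PySem.Str.join "." (parts.map String.ofList)).toList = PySem.Chars.join ['.'] parts := by
  rw [PySem.Str.toList_join, List.map_map]
  have h1 : ".".toList = ['.'] := by decide
  have h2 : String.toList ∘ String.ofList = id := by
    funext cs; simp [Function.comp, String.toList_ofList]
  rw [h1, h2, List.map_id]

theorem join_pySplitDot (l : String) : PySem.Str.join "." (pySplitDot l) = l := by
  rw [pySplitDot_eq]
  have h : (PySem.Str.join "." ((sd l.toList).map String.ofList)).toList = l.toList := by
    rw [toList_pySplitDot_join, join_sd]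
  calc PySem.Str.join "." ((sd l.toList).map String.ofList)
      = String.ofList (PySem.Str.join "." ((sd l.toList).map String.ofList)).toList := String.ofList_toList.symm
    _ = String.ofList l.toList := by rw [h]
    _ = l := String.ofList_toList

theorem pySplitDot_join_drop (l : String) (k : Nat) (hk : k < (pySplitDot l).length) :
    pySplitDot (PySem.Str.join "." ((pySplitDot l).drop k)) = (pySplitDot l).drop k := by
  have hrepr : pySplitDot l = (sd l.toList).map String.ofList := pySplitDot_eq l
  rw [hrepr] at hk
  rw [hrepr, ← List.map_drop]
  have hlen : k < (sd l.toList).length := by simpa using hk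
  have hne : (sd l.toList).drop k ≠ [] := by
    intro hnil
    have := List.drop_eq_nil_iff.mp hnil
    omega
  have hnd : ∀ p ∈ (sd l.toList).drop k, '.' ∉ p :=
    fun p hp => noDot_sd l.toList p (List.mem_of_mem_drop hp)
  rw [pySplitDot_eq, toList_pySplitDot_join, sd_join _ hne hnd]

theorem headD_drop (ts : List String) (j : Nat) : (ts.drop j).headD "" = ts.getD j "" := by
  simp [List.head?_drop, List.getD_eq_getElem?_getD]

theorem rstrip_decomp (ts : List String) :
    ts = rstripEmpty ts ++ List.replicate ((ts.reverse.takeWhile (· == "")).length) "" := by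
  have h := List.takeWhile_append_dropWhile (p := (· == "")) (l := ts.reverse)
  have h2 := congrArg List.reverse h
  rw [List.reverse_append, List.reverse_reverse] at h2
  have h3 : (ts.reverse.takeWhile (· == "")).reverse
      = List.replicate ((ts.reverse.takeWhile (· == "")).length) "" := by
    rw [List.eq_replicate_iff]
    constructor
    · simp
    · intro b hb
      have := List.mem_takeWhile_imp (List.mem_reverse.mp hb)
      simpa using this
  conv_lhs => rw [← h2]
  rw [h3, rstripEmpty]

theorem rstrip_last (ts : List String) (j : Nat) (hj : (rstripEmpty ts).length = j + 1) :
    bTok (rstripEmpty ts) j ≠ "" := by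
  have hwne : ts.reverse.dropWhile (· == "") ≠ [] := by
    intro h
    rw [rstripEmpty, h] at hj
    simp at hj
  have hne : rstripEmpty ts ≠ [] := by
    rw [rstripEmpty]
    simpa using hwne
  have hj2 : j < (rstripEmpty ts).length := by omega
  have hbtok : bTok (rstripEmpty ts) j = (rstripEmpty ts).getLast hne := by
    rw [bTok, List.getD_eq_getElem _ _ hj2, List.getLast_eq_getElem]
    congr 1
    omega
  have hrev : (rstripEmpty ts).getLast hne
      = (ts.reverse.dropWhile (· == "")).head (by simpa using hwne) := List.getLast_reverse _
  rw [hbtok, hrev]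
  intro hcontr
  have := List.head_dropWhile_not (· == "") (l := ts.reverse) (by simpa using hwne)
  rw [hcontr] at this
  simp at this

theorem ext_rstrip (ts : List String) (j : Nat) :
    bTok (rstripEmpty ts) j = bTok ts j := by
  conv_rhs => rw [rstrip_decomp ts]
  set r := rstripEmpty ts
  set m := (ts.reverse.takeWhile (· == "")).length
  by_cases hj : j < r.length
  · simp [bTok, List.getD_eq_getElem?_getD, List.getElem?_append_left hj]
  · push Not at hj
    have h1 : r.getD j "" = "" := List.getD_eq_default _ _ hj
    by_cases hj2 : j < r.length + m
    · simp only [bTok, h1, List.getD_eq_getElem?_getD, List.getElem?_append_right hj]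
      rw [List.getElem?_replicate, if_pos (by omega)]
      simp
    · push Not at hj2
      simp only [bTok, h1, List.getD_eq_getElem?_getD]
      rw [List.getElem?_eq_none (by simp; omega)]
      simp

theorem rstrip_eq_of_ext (ts us : List String) (h : ∀ j, bTok ts j = bTok us j) :
    rstripEmpty ts = rstripEmpty us := by
  have hext : ∀ j, bTok (rstripEmpty ts) j = bTok (rstripEmpty us) j := by
    intro j; rw [ext_rstrip, ext_rstrip, h]
  have hlen : (rstripEmpty ts).length = (rstripEmpty us).length := by
    by_contra hne
    rcases Nat.lt_or_gt_of_ne hne with hlt | hgt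
    · have hj : (rstripEmpty us).length = ((rstripEmpty us).length - 1) + 1 := by omega
      apply rstrip_last us _ hj
      rw [← hext]
      exact List.getD_eq_default _ _ (by omega)
    · have hj : (rstripEmpty ts).length = ((rstripEmpty ts).length - 1) + 1 := by omega
      apply rstrip_last ts _ hj
      rw [hext]
      exact List.getD_eq_default _ _ (by omega)
  apply List.ext_getElem hlen
  intro i h1 h2
  have hi := hext i
  rwa [bTok, bTok, List.getD_eq_getElem _ _ h1, List.getD_eq_getElem _ _ h2] at hi

theorem pySplitDot_ne_nil (l : String) : pySplitDot l ≠ [] := by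
  rw [pySplitDot_eq]
  simpa using sd_ne_nil l.toList

theorem pySplitDot_empty : pySplitDot "" = [""] := by decide

theorem join_nil_str : PySem.Str.join "." ([] : List String) = "" := by decide

-- the string a label has become after j levels have been stripped
def remS (l : String) (j : Nat) : String :=
  if j < (pySplitDot l).length then PySem.Str.join "." ((pySplitDot l).drop j) else ""

theorem remS_zero (l : String) : remS l 0 = l := by
  rw [remS, if_pos (by have := pySplitDot_ne_nil l; cases h : pySplitDot l <;> simp_all)]
  simpa using join_pySplitDot l

theorem sd_remS (l : String) (j : Nat) :
    pySplitDot (remS l j) =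
      (if j < (pySplitDot l).length then (pySplitDot l).drop j else [""]) := by
  rw [remS]
  by_cases hj : j < (pySplitDot l).length
  · rw [if_pos hj, if_pos hj, pySplitDot_join_drop l j hj]
  · rw [if_neg hj, if_neg hj, pySplitDot_empty]

theorem strip_remS (l : String) (j : Nat) :
    PySem.Str.join "." ((pySplitDot (remS l j)).drop 1) = remS l (j+1) := by
  rw [sd_remS]
  by_cases hj : j < (pySplitDot l).length
  · rw [if_pos hj, List.drop_drop]
    by_cases hj1 : j + 1 < (pySplitDot l).length
    · rw [remS, if_pos hj1]
    · rw [remS, if_neg hj1, List.drop_eq_nil_of_le (by omega), join_nil_str]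
  · rw [if_neg hj, remS, if_neg (by omega)]
    simpa using join_nil_str

theorem head_remS (l : String) (j : Nat) :
    (pySplitDot (remS l j)).headD "" = bTok (pySplitDot l) j := by
  rw [sd_remS]
  by_cases hj : j < (pySplitDot l).length
  · rw [if_pos hj, headD_drop, bTok]
  · rw [if_neg hj]
    rw [bTok, List.getD_eq_default _ _ (by omega)]
    simp

-- the loop condition, phrased once: all labels agree with the first one at token level j
def lcond (ls : List String) (j : Nat) : Bool :=
  ls.all (fun l => bTok (pySplitDot l) j == bTok (pySplitDot (ls.headD "")) j)

theorem headD_toks (ls : List String) : (ls.map pySplitDot).headD [""] = pySplitDot (ls.headD "") := by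
  cases ls with
  | nil => simp [pySplitDot_empty]
  | cons a t => simp

theorem btest_eq_lcond (ls : List String) (k : Nat) :
    ((ls.map pySplitDot).all (fun ts => bTok ts k == bTok ((ls.map pySplitDot).headD [""]) k))
      = lcond ls k := by
  rw [headD_toks, List.all_map, lcond]
  rfl

theorem bFindK_eq (ls : List String) (k0 : Nat) (hstop : lcond ls k0 = false) :
    ∀ fuel j, j ≤ k0 → k0 - j < fuel →
    (∀ i, j ≤ i → i < k0 → lcond ls i = true) →
    bFindK (ls.map pySplitDot) ((ls.map pySplitDot).headD [""]) fuel j = k0 := by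
  intro fuel
  induction fuel with
  | zero => intro j h1 h2 h3; omega
  | succ f ih =>
    intro j h1 h2 h3
    rw [bFindK, btest_eq_lcond]
    by_cases hj : j = k0
    · subst hj; rw [hstop]; simp
    · rw [h3 j le_rfl (by omega)]
      simp only [if_true]
      exact ih (j+1) (by omega) (by omega) (fun i hi1 hi2 => h3 i (by omega) hi2)

theorem stripOnce_eq (ls : List String) (j : Nat) :
    (ls.map (remS · j)).map (fun i => PySem.Str.join "." ((pySplitDot i).drop 1))
      = ls.map (remS · (j+1)) := by
  rw [List.map_map]
  exact List.map_congr_left (fun l _ => strip_remS l j)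

theorem aflag_eq_lcond (ls : List String) (hne : ls ≠ []) (j : Nat) :
    ((ls.map (remS · j)).foldl
      (fun f i => if !((pySplitDot i).headD "" == (pySplitDot ((ls.map (remS · j)).headD "")).headD "") then false else f) true)
      = lcond ls j := by
  obtain ⟨a, t, rfl⟩ := List.exists_cons_of_ne_nil hne
  rw [PySem.List.foldl_if_false_eq]
  simp only [Bool.true_and, ← List.all_eq_not_any_not]
  simp only [List.map_cons, List.headD_cons, lcond, List.all_cons, List.all_map,
    Function.comp_def, head_remS]

theorem aLoop_eq (ls : List String) (hne : ls ≠ []) (k0 : Nat) (hstop : lcond ls k0 = false) :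
    ∀ fuel j, j ≤ k0 → k0 - j < fuel →
    (∀ i, j ≤ i → i < k0 → lcond ls i = true) →
    aLoop fuel (ls.map (remS · j)) = ls.map (remS · k0) := by
  intro fuel
  induction fuel with
  | zero => intro j h1 h2 h3; omega
  | succ f ih =>
    intro j h1 h2 h3
    simp only [aLoop]
    rw [aflag_eq_lcond ls hne j]
    by_cases hj : j = k0
    · subst hj; rw [hstop]; simp
    · rw [h3 j le_rfl (by omega)]
      simp only [if_true]
      rw [stripOnce_eq]
      exact ih (j+1) (by omega) (by omega) (fun i hi1 hi2 => h3 i (by omega) hi2)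

theorem exists_k0 (ls : List String) (hne : ls ≠ [])
    (hpre : ¬ (∀ l ∈ ls, rstripEmpty (pySplitDot l) = rstripEmpty (pySplitDot (ls.headD "")))) :
    ∃ k0, lcond ls k0 = false ∧ (∀ i < k0, lcond ls i = true) ∧
      ∃ l ∈ ls, k0 < (pySplitDot l).length := by
  push Not at hpre
  obtain ⟨l0, hl0, hl0ne⟩ := hpre
  have hj : ∃ j, lcond ls j = false := by
    by_contra hall
    push Not at hall
    apply hl0ne
    apply rstrip_eq_of_ext
    intro j
    have h1 := hall j
    rw [Bool.ne_false_iff, lcond, List.all_eq_true] at h1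
    simpa using h1 l0 hl0
  refine ⟨Nat.find hj, Nat.find_spec hj, fun i hi => by simpa using Nat.find_min hj hi, ?_⟩
  have hk0 : lcond ls (Nat.find hj) = false := Nat.find_spec hj
  rw [lcond] at hk0
  obtain ⟨l1, hl1mem, hl1⟩ := List.all_eq_false.mp hk0
  by_cases h1 : Nat.find hj < (pySplitDot l1).length
  · exact ⟨l1, hl1mem, h1⟩
  · have hb1 : bTok (pySplitDot l1) (Nat.find hj) = "" := List.getD_eq_default _ _ (by omega)
    have hhne : bTok (pySplitDot (ls.headD "")) (Nat.find hj) ≠ "" := by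
      intro hh
      apply hl1
      rw [hb1, hh]
      simp
    have hlen : Nat.find hj < (pySplitDot (ls.headD "")).length := by
      by_contra hc
      exact hhne (List.getD_eq_default _ _ (by omega))
    refine ⟨ls.headD "", ?_, hlen⟩
    obtain ⟨a, t, rfl⟩ := List.exists_cons_of_ne_nil hne
    simp

theorem sd_length (cs : List Char) : (sd cs).length ≤ cs.length + 1 := by
  induction cs with
  | nil => simp [sd]
  | cons c r ih =>
    by_cases hc : c = '.'
    · subst hc
      rw [show sd ('.' :: r) = [] :: sd r by simp [sd]]
      simp only [List.length_cons]
      omega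
    · obtain ⟨h, t, hsd⟩ := List.exists_cons_of_ne_nil (sd_ne_nil r)
      rw [show sd (c :: r) = (c :: h) :: t by simp [sd, hc, hsd]]
      rw [hsd] at ih
      simp at ih ⊢
      omega

theorem pySplitDot_length (l : String) : (pySplitDot l).length ≤ l.toList.length + 1 := by
  rw [pySplitDot_eq]
  simpa using sd_length l.toList

-- ===== VERDICT (by name: the statement is the Claim_ definition above) =====
theorem change_label_depth_spec : Claim_equal_change_label_depth := by
  intro ls depth _hdom hpre
  obtain ⟨hne, hpre2⟩ := hpre
  unfold Spec_change_label_depth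
  obtain ⟨k0, hstop, hmin, l0, hl0mem, hl0len⟩ := exists_k0 ls hne hpre2
  have haf : k0 - 0 < aFuel ls := by
    have h1 : l0.toList.length ≤ ls.foldl (fun a l => a + l.toList.length) 0 := by
      rw [PySem.List.foldl_add_nat]
      simpa using List.le_sum_of_mem (List.mem_map_of_mem (f := fun l => l.toList.length) hl0mem)
    have h2 := pySplitDot_length l0
    unfold aFuel
    omega
  have hbf : k0 - 0 < bFuel (ls.map pySplitDot) := by
    have h1 : (pySplitDot l0).length ≤ (ls.map pySplitDot).foldl (fun a ts => a + ts.length) 0 := by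
      rw [PySem.List.foldl_add_nat, Nat.zero_add, List.map_map]
      exact List.le_sum_of_mem (List.mem_map_of_mem (f := fun l => (pySplitDot l).length) hl0mem)
    unfold bFuel
    omega
  have hmap0 : ls.map (remS · 0) = ls := by
    calc ls.map (remS · 0) = ls.map id := List.map_congr_left (fun l _ => remS_zero l)
      _ = ls := List.map_id ls
  have hA : aLoop (aFuel ls) ls = ls.map (remS · k0) := by
    have h := aLoop_eq ls hne k0 hstop (aFuel ls) 0 (Nat.zero_le _) haf (fun i _ hi2 => hmin i hi2)
    rwa [hmap0] at h
  have hB : bFindK (ls.map pySplitDot) ((ls.map pySplitDot).headD [""]) (bFuel (ls.map pySplitDot)) 0 = k0 :=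
    bFindK_eq ls k0 hstop _ 0 (Nat.zero_le _) hbf (fun i _ hi2 => hmin i hi2)
  show change_label_depth ls depth = change_label_depth_alt ls depth
  unfold change_label_depth change_label_depth_alt
  simp only [hA, hB]
  have hrest : (ls.map pySplitDot).map (fun ts => if k0 < ts.length then ts.drop k0 else [""])
      = (ls.map (remS · k0)).map pySplitDot := by
    rw [List.map_map, List.map_map]
    exact List.map_congr_left (fun l _ => by
      simp only [Function.comp_def]
      exact (sd_remS l k0).symm)
  rw [hrest]
  split_ifs with hdep
  · rw [List.map_map]
    simp [Function.comp_def]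
  · rw [List.map_map, List.map_map, List.map_map]
    apply List.map_congr_left
    intro l _
    simp only [Function.comp_def]
    by_cases hlen : ((pySplitDot (remS l k0)).length : Int) > depth + 1
    · rw [if_pos hlen, if_pos hlen]
      congr 1
    · rw [if_neg hlen, if_neg hlen, join_pySplitDot]
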